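-- pv_equiv track=rewrite | github.com/DzOlha/NLP-labs-2025 | 1-morphological-analysis/_stanza/table.py | _map_feats
-- ===== SOURCE A (Python) =====
-- CASE_MAP = {
--     "Nom": "Називний",
--     "Gen": "Родовий",
--     "Dat": "Давальний",
--     "Acc": "Знахідний",
--     "Ins": "Орудний",
--     "Loc": "Місцевий",
--     "Voc": "Кличний"
-- }
--
-- NUMBER_MAP = {
--     "Sing": "Однина",
--     "Plur": "Множина"
-- }
--
-- GENDER_MAP = {
--     "Masc": "Чоловічий",
--     "Fem": "Жіночий",
--     "Neut": "Середній",
--     "Com": "Спільний"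
-- }
--
-- TENSE_MAP = {
--     "Past": "Минулий",
--     "Pres": "Теперішній",
--     "Fut": "Майбутній"
-- }
--
-- ASPECT_MAP = {
--     "Perf": "Доконаний",
--     "Imp": "Недоконаний"
-- }
--
-- PERSON_MAP = {
--     "1": "1-ша",
--     "2": "2-га",
--     "3": "3-тя"
-- }
--
-- def _map_feats(feats_str):
--     """Повертає українські назви відмінку, числа, роду, виду, часу, особи"""
--     case, number, gender, aspect, tense, person = "-", "-", "-", "-", "-", "-"
--     if feats_str and feats_str != "_":
--         for feat in feats_str.split("|"):
--             if feat.startswith("Case="):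
--                 case = CASE_MAP.get(feat.split("=")[1], feat.split("=")[1])
--             elif feat.startswith("Number="):
--                 number = NUMBER_MAP.get(feat.split("=")[1], feat.split("=")[1])
--             elif feat.startswith("Gender="):
--                 gender = GENDER_MAP.get(feat.split("=")[1], feat.split("=")[1])
--             elif feat.startswith("Tense="):
--                 tense = TENSE_MAP.get(feat.split("=")[1], feat.split("=")[1])
--             elif feat.startswith("Aspect="):
--                 aspect = ASPECT_MAP.get(feat.split("=")[1], feat.split("=")[1])
--             elif feat.startswith("Person="):
--                 person = PERSON_MAP.get(feat.split("=")[1], feat.split("=")[1])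
--     return case, number, gender, aspect, tense, person
-- ===== SOURCE B (Python) =====
-- CASE_MAP = {
--     "Nom": "Називний", "Gen": "Родовий", "Dat": "Давальний", "Acc": "Знахідний",
--     "Ins": "Орудний", "Loc": "Місцевий", "Voc": "Кличний"
-- }
-- NUMBER_MAP = {"Sing": "Однина", "Plur": "Множина"}
-- GENDER_MAP = {"Masc": "Чоловічий", "Fem": "Жіночий", "Neut": "Середній", "Com": "Спільний"}
-- TENSE_MAP = {"Past": "Минулий", "Pres": "Теперішній", "Fut": "Майбутній"}
-- ASPECT_MAP = {"Perf": "Доконаний", "Imp": "Недоконаний"}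
-- PERSON_MAP = {"1": "1-ша", "2": "2-га", "3": "3-тя"}
--
--
-- def _map_feats(feats_str):
--     """Parse once into a key->value dict, then answer with six table lookups."""
--     d = {}
--     if feats_str and feats_str != "_":
--         for feat in feats_str.split("|"):
--             parts = feat.split("=")
--             if len(parts) >= 2:
--                 d[parts[0]] = parts[1]
--
--     def look(key, table):
--         v = d.get(key)
--         return table.get(v, v) if v is not None else "-"
--
--     return (look("Case", CASE_MAP), look("Number", NUMBER_MAP),
--             look("Gender", GENDER_MAP), look("Aspect", ASPECT_MAP),
--             look("Tense", TENSE_MAP), look("Person", PERSON_MAP))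
-- ===== Notes on version B (the rewrite author's own statement) =====
-- stated objective: idiomatic
-- what changed: B replaces A's six-way startswith if/elif dispatch inside the loop by a parse-once decomposition: it splits the feature string into a key->value dict in one pass and then answers with six table lookups.
import Mathlib
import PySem

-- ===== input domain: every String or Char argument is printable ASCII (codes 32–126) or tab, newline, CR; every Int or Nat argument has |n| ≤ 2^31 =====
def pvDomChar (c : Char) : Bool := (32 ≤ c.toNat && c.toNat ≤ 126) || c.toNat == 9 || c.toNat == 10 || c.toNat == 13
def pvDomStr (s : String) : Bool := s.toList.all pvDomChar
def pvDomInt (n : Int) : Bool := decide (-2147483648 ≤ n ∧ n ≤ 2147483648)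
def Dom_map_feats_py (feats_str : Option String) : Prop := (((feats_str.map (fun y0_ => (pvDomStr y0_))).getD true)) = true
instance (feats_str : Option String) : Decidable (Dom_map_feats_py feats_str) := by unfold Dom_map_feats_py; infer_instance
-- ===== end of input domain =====

-- B parses the feature string once into a key→value dict and then answers with six
-- table lookups, instead of A's inline six-way startswith dispatch inside the loop
-- (objective: more idiomatic decomposition; same cost).

-- ===== PORT A =====
-- module constants (shared data, used by both ports)
def caseMap : PySem.Dict String String := PySem.Dict.ofList
  [("Nom","Називний"),("Gen","Родовий"),("Dat","Давальний"),("Acc","Знахідний"),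
   ("Ins","Орудний"),("Loc","Місцевий"),("Voc","Кличний")]
def numberMap : PySem.Dict String String := PySem.Dict.ofList [("Sing","Однина"),("Plur","Множина")]
def genderMap : PySem.Dict String String := PySem.Dict.ofList
  [("Masc","Чоловічий"),("Fem","Жіночий"),("Neut","Середній"),("Com","Спільний")]
def tenseMap : PySem.Dict String String := PySem.Dict.ofList
  [("Past","Минулий"),("Pres","Теперішній"),("Fut","Майбутній")]
def aspectMap : PySem.Dict String String := PySem.Dict.ofList [("Perf","Доконаний"),("Imp","Недоконаний")]
def personMap : PySem.Dict String String := PySem.Dict.ofList [("1","1-ша"),("2","2-га"),("3","3-тя")]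

-- s.split(sep) for a nonempty literal sep (PySem.Chars.splitOn is the sep ≠ "" form)
def pySplit (s sep : String) : List String := (PySem.Chars.splitOn s.toList sep.toList).map String.ofList

-- feat.split("=")[1]; the "" default is unreachable in A: every use is guarded by
-- feat.startswith(k + "="), which guarantees index 1 exists
def pyEq1 (feat : String) : String := (PySem.List.pyGet? (pySplit feat "=") 1).getD ""

-- A's loop body: the six-way if/elif dispatch over the state tuple
-- (case, number, gender, aspect, tense, person)
def stepA (st : String × String × String × String × String × String) (feat : String) :
    String × String × String × String × String × String :=
  if PySem.Str.startswith feat "Case=" then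
    (caseMap.getD (pyEq1 feat) (pyEq1 feat), st.2.1, st.2.2.1, st.2.2.2.1, st.2.2.2.2.1, st.2.2.2.2.2)
  else if PySem.Str.startswith feat "Number=" then
    (st.1, numberMap.getD (pyEq1 feat) (pyEq1 feat), st.2.2.1, st.2.2.2.1, st.2.2.2.2.1, st.2.2.2.2.2)
  else if PySem.Str.startswith feat "Gender=" then
    (st.1, st.2.1, genderMap.getD (pyEq1 feat) (pyEq1 feat), st.2.2.2.1, st.2.2.2.2.1, st.2.2.2.2.2)
  else if PySem.Str.startswith feat "Tense=" then
    (st.1, st.2.1, st.2.2.1, st.2.2.2.1, tenseMap.getD (pyEq1 feat) (pyEq1 feat), st.2.2.2.2.2)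
  else if PySem.Str.startswith feat "Aspect=" then
    (st.1, st.2.1, st.2.2.1, aspectMap.getD (pyEq1 feat) (pyEq1 feat), st.2.2.2.2.1, st.2.2.2.2.2)
  else if PySem.Str.startswith feat "Person=" then
    (st.1, st.2.1, st.2.2.1, st.2.2.2.1, st.2.2.2.2.1, personMap.getD (pyEq1 feat) (pyEq1 feat))
  else st

def map_feats_py (feats_str : Option String) : String × String × String × String × String × String :=
  match feats_str with
  | none => ("-", "-", "-", "-", "-", "-")   -- `feats_str and …` is falsy for None
  | some s =>
    if s ≠ "" ∧ s ≠ "_" then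
      (pySplit s "|").foldl stepA ("-", "-", "-", "-", "-", "-")
    else ("-", "-", "-", "-", "-", "-")

-- ===== PORT B =====
-- B's loop body: d[parts[0]] = parts[1] whenever the token has a value
-- (the "" defaults are unreachable: the length guard guarantees indices 0 and 1 exist)
def stepB (d : PySem.Dict String String) (feat : String) : PySem.Dict String String :=
  let parts := pySplit feat "="
  if 2 ≤ parts.length then
    d.insert ((PySem.List.pyGet? parts 0).getD "") ((PySem.List.pyGet? parts 1).getD "")
  else d

-- v = d.get(key); table.get(v, v) if v is not None else "-"
def lookB (d : PySem.Dict String String) (key : String) (table : PySem.Dict String String) : String :=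
  match d.get? key with
  | some v => table.getD v v
  | none => "-"

def readout (d : PySem.Dict String String) : String × String × String × String × String × String :=
  (lookB d "Case" caseMap, lookB d "Number" numberMap, lookB d "Gender" genderMap,
   lookB d "Aspect" aspectMap, lookB d "Tense" tenseMap, lookB d "Person" personMap)

def map_feats_py_alt (feats_str : Option String) : String × String × String × String × String × String :=
  let d : PySem.Dict String String :=
    match feats_str with
    | none => PySem.Dict.empty
    | some s =>
      if s ≠ "" ∧ s ≠ "_" then (pySplit s "|").foldl stepB PySem.Dict.empty
      else PySem.Dict.empty
  readout d

-- ===== PRECONDITION & SPEC =====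
def Spec_map_feats_py (feats_str : Option String) (out : String × String × String × String × String × String) : Prop := out = map_feats_py_alt feats_str
instance (feats_str : Option String) (out : String × String × String × String × String × String) : Decidable (Spec_map_feats_py feats_str out) := by unfold Spec_map_feats_py; infer_instance

-- ===== CLAIM (what is proved, stated in full; the proofs are below) =====
def Claim_equal_map_feats_py : Prop := ∀ (feats_str : Option String), Dom_map_feats_py feats_str → Spec_map_feats_py feats_str (map_feats_py feats_str)

-- ===== LEMMAS AND PROOFS =====

-- PySem.Chars.splitOn with a single-character separator is core List.splitOn
theorem splitOn_go_single (c : Char) : ∀ (fuel : Nat) (l cur : List Char) (acc : List (List Char)),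
    l.length ≤ fuel →
    PySem.Chars.splitOn.go [c] fuel l cur acc = acc.reverse ++ (l.splitOn c).modifyHead (cur.reverse ++ ·) := by
  intro fuel
  induction fuel with
  | zero =>
    intro l cur acc h
    have hl : l = [] := List.eq_nil_of_length_eq_zero (Nat.le_zero.mp h)
    subst hl
    simp [PySem.Chars.splitOn.go, List.splitOn]
  | succ n ih =>
    intro l cur acc h
    cases l with
    | nil => simp [PySem.Chars.splitOn.go, List.splitOn]
    | cons a rest =>
      rw [PySem.Chars.splitOn.go]
      by_cases hca : c = a
      · subst hca
        have hp : [c].isPrefixOf (c :: rest) = true := by simp [List.isPrefixOf]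
        rw [if_pos hp, show List.drop [c].length (c :: rest) = rest from by simp,
          ih rest [] (cur.reverse :: acc) (by simpa using Nat.succ_le_succ_iff.mp h)]
        obtain ⟨h0, t0, he⟩ := List.exists_cons_of_ne_nil (List.splitOnP_ne_nil (· == c) rest)
        simp only [List.splitOn] at he ⊢
        simp [List.splitOnP_cons, he]
      · have hp : [c].isPrefixOf (a :: rest) = false := by
          simp [List.isPrefixOf, beq_false_of_ne hca]
        rw [if_neg (by simp [hp]), ih rest (a :: cur) acc (by simpa using Nat.succ_le_succ_iff.mp h)]
        obtain ⟨h0, t0, he⟩ := List.exists_cons_of_ne_nil (List.splitOnP_ne_nil (· == c) rest)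
        simp only [List.splitOn] at he ⊢
        simp [List.splitOnP_cons, beq_false_of_ne (Ne.symm hca), he]

theorem chars_splitOn_single (cs : List Char) (c : Char) :
    PySem.Chars.splitOn cs [c] = cs.splitOn c := by
  rw [PySem.Chars.splitOn, splitOn_go_single c (cs.length + 1) cs [] [] (Nat.le_succ _)]
  obtain ⟨h0, t0, he⟩ := List.exists_cons_of_ne_nil (List.splitOnP_ne_nil (· == c) cs)
  simp only [List.splitOn] at he ⊢
  simp [he]

-- feat.split("=") in terms of core List.splitOn
theorem pySplit_eq (s : String) : pySplit s "=" = (s.toList.splitOn '=').map String.ofList := by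
  have h : ("=" : String).toList = ['='] := rfl
  simp [pySplit, h, chars_splitOn_single]

-- the first piece of l.splitOn c contains no c, and if there is a second piece
-- then (first piece ++ [c]) is a prefix of l
theorem splitOn_head_spec (c : Char) : ∀ l : List Char, ∃ h t, l.splitOn c = h :: t ∧ c ∉ h ∧
    (t ≠ [] → (h ++ [c]) <+: l) := by
  intro l
  induction l with
  | nil => exact ⟨[], [], by simp [List.splitOn], by simp, by simp⟩
  | cons a rest ih =>
    obtain ⟨h, t, he, hc, hp⟩ := ih
    by_cases hca : a = c
    · subst hca
      refine ⟨[], h :: t, ?_, by simp, ?_⟩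
      · simp only [List.splitOn] at he ⊢
        simp [List.splitOnP_cons, he]
      · intro _; exact ⟨rest, by simp⟩
    · refine ⟨a :: h, t, ?_, ?_, ?_⟩
      · simp only [List.splitOn] at he ⊢
        simp [List.splitOnP_cons, beq_false_of_ne hca, he]
      · simp only [List.mem_cons, not_or]
        exact ⟨fun hac => hca (hac.symm ▸ rfl), hc⟩
      · intro ht
        obtain ⟨r, hr⟩ := hp ht
        exact ⟨r, by simp [← hr]⟩

-- splitting a string that starts with k ++ [c] (k free of c) peels off k
theorem splitOn_prefix (c : Char) : ∀ (k l : List Char), c ∉ k →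
    (k ++ c :: l).splitOn c = k :: l.splitOn c := by
  intro k
  induction k with
  | nil => intro l _; simp [List.splitOn, List.splitOnP_cons]
  | cons a k' ih =>
    intro l hc
    have hac : ¬ (a == c) = true := by
      simp only [beq_iff_eq]
      intro h; exact hc (by simp [h])
    have hih := ih l (fun hm => hc (List.mem_cons_of_mem a hm))
    simp only [List.splitOn, List.cons_append] at hih ⊢
    simp [List.splitOnP_cons, hac, hih]

-- the per-token characterisation: feat starts with k ++ "=" iff feat.split("=")
-- has ≥ 2 pieces and its first piece is k  (p is the literal string k ++ "=")
theorem startswith_iff_parts (feat k p : String) (hk : ('=' : Char) ∉ k.toList)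
    (hp : p.toList = k.toList ++ ['=']) :
    (PySem.Str.startswith feat p = true ↔
      ∃ v t, pySplit feat "=" = k :: v :: t) := by
  have hsw : PySem.Str.startswith feat p = true ↔ p.toList <+: feat.toList := by
    simp [PySem.Chars.startswith_iff]
  constructor
  · intro h
    obtain ⟨r, hr⟩ := hsw.mp h
    rw [hp, List.append_assoc] at hr
    have hsp : feat.toList.splitOn '=' = k.toList :: r.splitOn '=' := by
      rw [← hr]; exact splitOn_prefix '=' k.toList r hk
    obtain ⟨h0, t0, he⟩ := List.exists_cons_of_ne_nil (List.splitOnP_ne_nil (· == '=') r)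
    refine ⟨String.ofList h0, t0.map String.ofList, ?_⟩
    rw [pySplit_eq, hsp, show r.splitOn '=' = h0 :: t0 from he]
    simp
  · rintro ⟨v, t, hvt⟩
    obtain ⟨h0, t0, he, hc0, hpre⟩ := splitOn_head_spec '=' feat.toList
    rw [pySplit_eq, he] at hvt
    cases t0 with
    | nil => simp at hvt
    | cons t1 ts =>
      simp only [List.map_cons, List.cons.injEq] at hvt
      have hk0 : h0 = k.toList := by rw [← hvt.1]; simp
      apply hsw.mpr
      rw [hp, ← hk0]
      exact hpre (by simp)

theorem lookB_insert (d : PySem.Dict String String) (k k' v : String) (M : PySem.Dict String String) :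
    lookB (d.insert k v) k' M = if k' = k then M.getD v v else lookB d k' M := by
  by_cases h : k' = k
  · subst h; simp [lookB, PySem.Dict.get?_insert_self]
  · simp [lookB, h, PySem.Dict.get?_insert_of_ne d v h]

-- A's loop body applied to a readout equals the readout after B's loop body
theorem step_equiv (d : PySem.Dict String String) (feat : String) :
    stepA (readout d) feat = readout (stepB d feat) := by
  have iffC := startswith_iff_parts feat "Case" "Case=" (by decide) (by decide)
  have iffN := startswith_iff_parts feat "Number" "Number=" (by decide) (by decide)
  have iffG := startswith_iff_parts feat "Gender" "Gender=" (by decide) (by decide)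
  have iffT := startswith_iff_parts feat "Tense" "Tense=" (by decide) (by decide)
  have iffA := startswith_iff_parts feat "Aspect" "Aspect=" (by decide) (by decide)
  have iffP := startswith_iff_parts feat "Person" "Person=" (by decide) (by decide)
  unfold stepA
  by_cases h1 : PySem.Str.startswith feat "Case=" = true
  · obtain ⟨v, t, hps⟩ := iffC.mp h1
    rw [if_pos h1]
    simp [readout, pyEq1, hps, stepB, lookB_insert]
  · rw [if_neg h1]
    by_cases h2 : PySem.Str.startswith feat "Number=" = true
    · obtain ⟨v, t, hps⟩ := iffN.mp h2
      rw [if_pos h2]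
      simp [readout, pyEq1, hps, stepB, lookB_insert]
    · rw [if_neg h2]
      by_cases h3 : PySem.Str.startswith feat "Gender=" = true
      · obtain ⟨v, t, hps⟩ := iffG.mp h3
        rw [if_pos h3]
        simp [readout, pyEq1, hps, stepB, lookB_insert]
      · rw [if_neg h3]
        by_cases h4 : PySem.Str.startswith feat "Tense=" = true
        · obtain ⟨v, t, hps⟩ := iffT.mp h4
          rw [if_pos h4]
          simp [readout, pyEq1, hps, stepB, lookB_insert]
        · rw [if_neg h4]
          by_cases h5 : PySem.Str.startswith feat "Aspect=" = true
          · obtain ⟨v, t, hps⟩ := iffA.mp h5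
            rw [if_pos h5]
            simp [readout, pyEq1, hps, stepB, lookB_insert]
          · rw [if_neg h5]
            by_cases h6 : PySem.Str.startswith feat "Person=" = true
            · obtain ⟨v, t, hps⟩ := iffP.mp h6
              rw [if_pos h6]
              simp [readout, pyEq1, hps, stepB, lookB_insert]
            · rw [if_neg h6]
              -- no branch of A fires; B inserts nothing, or a key other than the six
              match hps : pySplit feat "=" with
              | [] => simp [stepB, hps]
              | [p0] => simp [stepB, hps]
              | p0 :: p1 :: t =>
                have hne : ∀ k p : String, ('=' : Char) ∉ k.toList → p.toList = k.toList ++ ['='] →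
                    ¬ PySem.Str.startswith feat p = true → ¬ (k = p0) := by
                  intro k p hk hp hsw he
                  exact hsw ((startswith_iff_parts feat k p hk hp).mpr ⟨p1, t, he ▸ hps⟩)
                have n1 := hne "Case" "Case=" (by decide) (by decide) h1
                have n2 := hne "Number" "Number=" (by decide) (by decide) h2
                have n3 := hne "Gender" "Gender=" (by decide) (by decide) h3
                have n4 := hne "Tense" "Tense=" (by decide) (by decide) h4
                have n5 := hne "Aspect" "Aspect=" (by decide) (by decide) h5
                have n6 := hne "Person" "Person=" (by decide) (by decide) h6
                simp [stepB, hps, readout, lookB_insert,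
                  n1, n2, n3, n4, n5, n6]

-- the fold invariant: folding A's dispatch over a readout tracks B's dict fold
theorem fold_equiv (tokens : List String) : ∀ d : PySem.Dict String String,
    tokens.foldl stepA (readout d) = readout (tokens.foldl stepB d) := by
  induction tokens with
  | nil => intro d; rfl
  | cons f ts ih =>
    intro d
    simp only [List.foldl_cons, step_equiv d f]
    exact ih (stepB d f)

-- ===== VERDICT (by name: the statement is the Claim_ definition above) =====
theorem map_feats_py_spec : Claim_equal_map_feats_py := by
  intro feats_str _
  unfold Spec_map_feats_py map_feats_py map_feats_py_alt
  have hre : readout PySem.Dict.empty = ("-", "-", "-", "-", "-", "-") := rfl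
  cases feats_str with
  | none => simp [hre]
  | some s =>
    by_cases hc : s ≠ "" ∧ s ≠ "_"
    · simp only [if_pos hc]
      rw [← hre, fold_equiv]
    · simp only [if_neg hc, hre]
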